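-- pv_equiv track=rewrite | github.com/619cip/CSCI1133 | homework10/hw10.py | follows
-- ===== SOURCE A (Python) =====
-- def follows(text):
--     '''
--     Purpose: Gets pairs of adjacent words in a string of text
--     Parameters:
--         text: sample text to get the adjacent words from (str)
--     Return Value:
--         A nested dictionary with all pairs of adjacent words.
--         The keys in the outer dictionary are the first word in
--         each pair from the text, and the values are inner dictionaries
--         containing each word that follows that one as keys, and a
--         count of how many times that pair occurs as values (dict)
--     '''
--     words = text.split()
--     pairs = {}
--     for i in range(len(words)-1):
--         first = words[i]
--         second = words[i+1]
--         pairs[first] = pairs.get(first, {})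
--         pairs[first][second] = 1 + pairs[first].get(second, 0)
--     return pairs
-- ===== SOURCE B (Python) =====
-- def follows(text):
--     words = text.split()
--     # pass 1: count each adjacent pair once, in a flat dict keyed by the pair
--     counts = {}
--     for pair in zip(words, words[1:]):
--         counts[pair] = counts.get(pair, 0) + 1
--     # pass 2: regroup the flat counts into the nested dict
--     pairs = {}
--     for (first, second), n in counts.items():
--         pairs.setdefault(first, {})[second] = n
--     return pairs
-- ===== Notes on version B (the rewrite author's own statement) =====
-- stated objective: alternative
-- what changed: A builds the nested dict incrementally while indexing words by position; B first counts flat (first, second) pairs from zip(words, words[1:]) in one dict, then regroups that flat count dict into the nested dict in a second pass.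
import Mathlib
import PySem

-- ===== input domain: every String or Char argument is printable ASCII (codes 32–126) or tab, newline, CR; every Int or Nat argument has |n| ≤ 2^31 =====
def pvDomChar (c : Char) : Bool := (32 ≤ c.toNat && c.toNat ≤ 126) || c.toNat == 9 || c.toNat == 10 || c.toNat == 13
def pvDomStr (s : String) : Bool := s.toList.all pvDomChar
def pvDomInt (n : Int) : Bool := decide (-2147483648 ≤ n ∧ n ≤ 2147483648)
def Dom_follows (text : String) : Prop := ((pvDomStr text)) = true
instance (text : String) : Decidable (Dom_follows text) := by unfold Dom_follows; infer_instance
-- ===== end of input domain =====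

-- B replaces A's incremental nested build over word indices by a count-then-regroup
-- decomposition (flat pair counts first, nested dict second); objective: alternative.

-- ===== PORT A =====
def follows (text : String) : List (String × List (String × Int)) :=
  let words := PySem.Str.split₀ text
  let pairs :=
    (PySem.List.pyRange 0 (PySem.List.len words - 1) 1).foldl
      (fun (d : PySem.Dict String (PySem.Dict String Int)) i =>
        let first := PySem.List.pyGetD words i ""
        let second := PySem.List.pyGetD words (i + 1) ""
        -- pairs[first] = pairs.get(first, {}); pairs[first][second] = 1 + pairs[first].get(second, 0)
        let inner := d.getD first PySem.Dict.empty
        d.insert first (inner.insert second (1 + inner.getD second 0)))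
      PySem.Dict.empty
  pairs.items.map (fun p => (p.1, p.2.items))

-- ===== PORT B =====
def follows_alt (text : String) : List (String × List (String × Int)) :=
  let words := PySem.Str.split₀ text
  let counts :=
    (words.zip (PySem.List.slice words (some 1) none)).foldl
      (fun (d : PySem.Dict (String × String) Int) p => d.insert p (d.getD p 0 + 1))
      PySem.Dict.empty
  let pairs :=
    counts.items.foldl
      (fun (r : PySem.Dict String (PySem.Dict String Int)) pc =>
        -- pairs.setdefault(first, {})[second] = n  ≡  pairs[first] = pairs.get(first, {}) with second ↦ n
        r.modify pc.1.1 PySem.Dict.empty (fun inner => inner.insert pc.1.2 pc.2))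
      PySem.Dict.empty
  pairs.items.map (fun p => (p.1, p.2.items))

-- ===== PRECONDITION & SPEC =====
def Spec_follows (text : String) (out : List (String × List (String × Int))) : Prop := out = follows_alt text
instance (text : String) (out : List (String × List (String × Int))) : Decidable (Spec_follows text out) := by unfold Spec_follows; infer_instance

-- ===== CLAIM (what is proved, stated in full; the proofs are below) =====
def Claim_equal_follows : Prop := ∀ (text : String), Dom_follows text → Spec_follows text (follows text)

-- ===== LEMMAS AND PROOFS =====

theorem ofList_map_ofList {α β : Type} [BEq α] [LawfulBEq α] [BEq β] [LawfulBEq β]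
    (l : List α) (f : α → β) :
    PySem.Set.ofList ((PySem.Set.ofList l).map f) = PySem.Set.ofList (l.map f) := by
  induction l using List.reverseRecOn with
  | nil => rfl
  | append_singleton l x ih =>
    rw [PySem.Set.ofList_append_singleton, List.map_append, List.map_singleton,
      PySem.Set.ofList_append_singleton]
    by_cases hx : x ∈ PySem.Set.ofList l
    · rw [PySem.Set.add_of_mem hx, ih, PySem.Set.add_of_mem]
      rw [PySem.Set.mem_ofList] at hx ⊢
      exact List.mem_map_of_mem hx
    · rw [PySem.Set.add_of_not_mem hx, List.map_append, List.map_singleton,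
        PySem.Set.ofList_append_singleton, ih]

theorem ofList_filter {α : Type} [BEq α] [LawfulBEq α] (l : List α) (q : α → Bool) :
    PySem.Set.ofList (l.filter q) = (PySem.Set.ofList l).filter q := by
  induction l using List.reverseRecOn with
  | nil => rfl
  | append_singleton l x ih =>
    rw [List.filter_append, List.filter_singleton]
    by_cases hx : x ∈ PySem.Set.ofList l
    · rw [PySem.Set.ofList_append_singleton, PySem.Set.add_of_mem hx]
      by_cases hq : q x
      · simp only [hq, cond_true]
        rw [PySem.Set.ofList_append_singleton, PySem.Set.add_of_mem, ih]
        rw [ih]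
        exact List.mem_filter.mpr ⟨hx, hq⟩
      · simp only [hq, cond_false, List.append_nil, ih]
    · rw [PySem.Set.ofList_append_singleton, PySem.Set.add_of_not_mem hx,
        List.filter_append, List.filter_singleton]
      by_cases hq : q x
      · simp only [hq, cond_true]
        rw [PySem.Set.ofList_append_singleton, PySem.Set.add_of_not_mem, ih]
        rw [ih]
        intro hmem
        exact hx (List.mem_filter.mp hmem).1
      · simp only [hq, cond_false, List.append_nil, ih]

theorem ofList_map_inj {α β : Type} [BEq α] [LawfulBEq α] [BEq β] [LawfulBEq β]
    (l : List α) (f : α → β) (hinj : ∀ x ∈ l, ∀ y ∈ l, f x = f y → x = y) :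
    PySem.Set.ofList (l.map f) = (PySem.Set.ofList l).map f := by
  induction l using List.reverseRecOn with
  | nil => rfl
  | append_singleton l x ih =>
    have hinj' : ∀ a ∈ l, ∀ b ∈ l, f a = f b → a = b := fun a ha b hb =>
      hinj a (List.mem_append_left _ ha) b (List.mem_append_left _ hb)
    rw [List.map_append, List.map_singleton, PySem.Set.ofList_append_singleton,
      PySem.Set.ofList_append_singleton, ih hinj']
    by_cases hx : x ∈ PySem.Set.ofList l
    · rw [PySem.Set.add_of_mem hx, PySem.Set.add_of_mem (List.mem_map_of_mem hx)]
    · rw [PySem.Set.add_of_not_mem hx, PySem.Set.add_of_not_mem, List.map_append,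
        List.map_singleton]
      intro hmem
      rw [PySem.Set.mem_ofList] at hx
      rcases List.mem_map.mp hmem with ⟨y, hy', hfy⟩
      have hy : y ∈ l := (PySem.Set.mem_ofList _ _).mp hy'
      have := hinj y (List.mem_append_left _ hy) x
        (List.mem_append_right _ (List.mem_singleton.mpr rfl)) hfy
      exact hx (this ▸ hy)

def stepA (d : PySem.Dict String (PySem.Dict String Int)) (p : String × String) :
    PySem.Dict String (PySem.Dict String Int) :=
  d.insert p.1 ((d.getD p.1 PySem.Dict.empty).insert p.2
    (1 + (d.getD p.1 PySem.Dict.empty).getD p.2 0))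

def stepR (r : PySem.Dict String (PySem.Dict String Int)) (pc : (String × String) × Int) :
    PySem.Dict String (PySem.Dict String Int) :=
  r.modify pc.1.1 PySem.Dict.empty (fun inner => inner.insert pc.1.2 pc.2)

theorem getD_foldl_stepA (l : List (String × String)) (f : String) :
    ∀ d, (l.foldl stepA d).getD f PySem.Dict.empty
      = ((l.filter (fun p => p.1 == f)).map (·.2)).foldl
          (fun di s => di.insert s (1 + di.getD s 0)) (d.getD f PySem.Dict.empty) := by
  induction l with
  | nil => intro d; rfl
  | cons p l ih =>
    intro d
    rw [List.foldl_cons, ih, List.filter_cons]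
    by_cases hp : p.1 = f
    · simp only [hp, beq_self_eq_true, if_pos, List.map_cons, List.foldl_cons, stepA,
        PySem.Dict.getD_insert]
    · have : (p.1 == f) = false := beq_eq_false_iff_ne.mpr hp
      simp only [this, Bool.false_eq_true, if_neg, not_false_iff, stepA,
        PySem.Dict.getD_insert, Ne.symm hp]

theorem getD_foldl_stepR (m : List ((String × String) × Int)) (f : String) :
    ∀ r, (m.foldl stepR r).getD f PySem.Dict.empty
      = (m.filter (fun pc => pc.1.1 == f)).foldl
          (fun di pc => di.insert pc.1.2 pc.2) (r.getD f PySem.Dict.empty) := by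
  induction m with
  | nil => intro r; rfl
  | cons pc m ih =>
    intro r
    rw [List.foldl_cons, ih, List.filter_cons]
    by_cases hp : pc.1.1 = f
    · simp only [hp, beq_self_eq_true, if_pos, List.foldl_cons, stepR,
        PySem.Dict.getD_modify]
    · have : (pc.1.1 == f) = false := beq_eq_false_iff_ne.mpr hp
      simp only [this, Bool.false_eq_true, if_neg, not_false_iff, stepR,
        PySem.Dict.getD_modify]
      rw [if_neg (fun h => hp h.symm)]

theorem foldl_one_add_eq_counter (ys : List String) :
    ys.foldl (fun di s => di.insert s (1 + di.getD s 0)) PySem.Dict.empty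
      = PySem.Dict.counter ys := by
  have h : (fun (di : PySem.Dict String Int) s => di.insert s (1 + di.getD s 0))
      = fun di s => di.insert s (di.getD s 0 + 1) := by
    funext di s; rw [Int.add_comm]
  rw [h, PySem.Dict.foldl_insert_getD_add_one_eq_counter]

theorem count_map_snd_filter (l : List (String × String)) (p : String × String) :
    ((l.filter (fun q => q.1 == p.1)).map (·.2)).count p.2 = l.count p := by
  rw [List.count_eq_countP, List.count_eq_countP, List.countP_map, List.countP_filter]
  apply List.countP_congr
  intro x _
  cases x; cases p
  simp [Function.comp, Prod.ext_iff, And.comm]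

theorem getD_NA_eq_getD_R (l : List (String × String)) (f : String) :
    (l.foldl stepA PySem.Dict.empty).getD f PySem.Dict.empty
      = ((PySem.Dict.counter l).items.foldl stepR PySem.Dict.empty).getD f PySem.Dict.empty := by
  rw [getD_foldl_stepA, getD_foldl_stepR, PySem.Dict.getD_empty,
    foldl_one_add_eq_counter]
  apply PySem.Dict.ext
  -- LHS inner items
  rw [PySem.Dict.items_counter]
  -- RHS: the filtered counter items are a map over the filtered distinct pairs
  have hitems : (PySem.Dict.counter l).items.filter (fun pc => pc.1.1 == f)
      = ((PySem.Set.ofList l).filter (fun p => p.1 == f)).map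
          (fun p => (p, (l.count p : Int))) := by
    rw [PySem.Dict.items_counter, List.filter_map]
    rfl
  rw [hitems]
  set m0 : List (String × String) := (PySem.Set.ofList l).filter (fun p => p.1 == f) with hm0
  have hm0mem : ∀ p ∈ m0, p.1 = f := by
    intro p hp
    exact beq_iff_eq.mp (List.mem_filter.mp hp).2
  have hm0nodup : m0.Nodup := (PySem.Set.nodup_ofList l).filter _
  have hsndnodup : (m0.map (·.2)).Nodup := by
    apply List.Nodup.map_on _ hm0nodup
    intro x hx y hy hxy
    exact Prod.ext ((hm0mem x hx).trans (hm0mem y hy).symm) hxy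
  -- RHS inner items: inserts over fresh distinct keys append
  have hfresh := PySem.Dict.items_foldl_insert_fresh
    (m0.map (fun p => (p, (l.count p : Int)))) (fun pc => pc.1.2) (fun pc => pc.2)
    PySem.Dict.empty (fun a _ => PySem.Dict.contains_empty a.1.2)
    (by rw [List.map_map]; exact hsndnodup)
  rw [hfresh]
  simp only [PySem.Dict.empty, List.nil_append]
  -- LHS: the distinct seconds are m0.map (·.2)
  have hys : PySem.Set.ofList ((l.filter (fun p => p.1 == f)).map (·.2)) = m0.map (·.2) := by
    rw [ofList_map_inj, ofList_filter]
    intro x hx y hy hxy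
    have hx1 : x.1 = f := beq_iff_eq.mp (List.mem_filter.mp hx).2
    have hy1 : y.1 = f := beq_iff_eq.mp (List.mem_filter.mp hy).2
    exact Prod.ext (hx1.trans hy1.symm) hxy
  rw [hys, List.map_map, List.map_map]
  apply List.map_congr_left
  intro p hp
  have h1 : p.1 = f := hm0mem p hp
  simp only [Function.comp]
  rw [← h1, count_map_snd_filter]

theorem NA_eq_R (l : List (String × String)) :
    l.foldl stepA PySem.Dict.empty
      = (PySem.Dict.counter l).items.foldl stepR PySem.Dict.empty := by
  have hstepA : stepA = fun d (x : String × String) => d.insert x.1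
      ((d.getD x.1 PySem.Dict.empty).insert x.2
        (1 + (d.getD x.1 PySem.Dict.empty).getD x.2 0)) := rfl
  have hstepR : stepR = fun r (pc : (String × String) × Int) =>
      r.modify pc.1.1 PySem.Dict.empty (fun inner => inner.insert pc.1.2 pc.2) := rfl
  have hndA : (l.foldl stepA PySem.Dict.empty).keys.Nodup := by
    rw [hstepA]
    exact PySem.Dict.nodup_keys_foldl_insert_key l (·.1) _ _ PySem.Dict.nodup_keys_empty
  have hndR : ((PySem.Dict.counter l).items.foldl stepR PySem.Dict.empty).keys.Nodup := by
    rw [hstepR]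
    exact PySem.Dict.nodup_keys_foldl_modify_key (PySem.Dict.counter l).items
      (fun pc => pc.1.1) PySem.Dict.empty
      (fun _ pc inner => inner.insert pc.1.2 pc.2) _ PySem.Dict.nodup_keys_empty
  have hkeysA : (l.foldl stepA PySem.Dict.empty).keys = PySem.Set.ofList (l.map (·.1)) := by
    rw [hstepA, PySem.Dict.keys_foldl_insert_key, PySem.Dict.keys_empty,
      PySem.Set.update_nil_left]
  have hkeysR : ((PySem.Dict.counter l).items.foldl stepR PySem.Dict.empty).keys
      = PySem.Set.ofList (l.map (·.1)) := by
    rw [hstepR, PySem.Dict.keys_foldl_modify_key (PySem.Dict.counter l).items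
      (fun pc => pc.1.1) PySem.Dict.empty (fun _ pc inner => inner.insert pc.1.2 pc.2),
      PySem.Dict.keys_empty, PySem.Set.update_nil_left, PySem.Dict.items_counter, List.map_map]
    exact ofList_map_ofList l (·.1)
  apply PySem.Dict.ext
  rw [PySem.Dict.items_eq_map_keys _ hndA PySem.Dict.empty,
    PySem.Dict.items_eq_map_keys _ hndR PySem.Dict.empty, hkeysA, hkeysR]
  apply List.map_congr_left
  intro f _
  rw [getD_NA_eq_getD_R]

theorem range_pairs_eq_zip (ws : List String) :
    (PySem.List.pyRange 0 (PySem.List.len ws - 1) 1).map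
        (fun i => (PySem.List.pyGetD ws i "", PySem.List.pyGetD ws (i + 1) ""))
      = ws.zip ws.tail := by
  rw [PySem.List.pyRange_one, List.map_map]
  apply List.ext_getElem
  · simp only [List.length_map, List.length_range, List.length_zip, List.length_tail,
      PySem.List.len_eq]
    omega
  · intro k h1 h2
    have hk : k < ws.length - 1 := by
      simp only [List.length_map, List.length_range, PySem.List.len_eq] at h1
      omega
    simp only [List.getElem_map, List.getElem_range, Function.comp, List.getElem_zip,
      List.getElem_tail]
    have e1 : (0 : Int) + (k : Int) = ((k : Nat) : Int) := by omega
    rw [e1]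
    have e2 : ((k : Nat) : Int) + 1 = (((k + 1 : Nat)) : Int) := by push_cast; ring
    rw [e2, PySem.List.pyGetD_natCast, PySem.List.pyGetD_natCast,
      List.getD_eq_getElem _ _ (by omega), List.getD_eq_getElem _ _ (by omega)]

theorem follows_eq_follows_alt (text : String) : follows text = follows_alt text := by
  show ((PySem.List.pyRange 0 (PySem.List.len (PySem.Str.split₀ text) - 1) 1).foldl
      (fun d i => stepA d (PySem.List.pyGetD (PySem.Str.split₀ text) i "",
        PySem.List.pyGetD (PySem.Str.split₀ text) (i + 1) ""))
      PySem.Dict.empty).items.map (fun p => (p.1, p.2.items)) = _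
  rw [← List.foldl_map, range_pairs_eq_zip]
  show _ = ((((PySem.Str.split₀ text).zip
      (PySem.List.slice (PySem.Str.split₀ text) (some 1) none)).foldl
      (fun d p => d.insert p (d.getD p 0 + 1)) PySem.Dict.empty).items.foldl stepR
      PySem.Dict.empty).items.map (fun p => (p.1, p.2.items))
  rw [PySem.List.slice_from_one, PySem.Dict.foldl_insert_getD_add_one_eq_counter, NA_eq_R]

-- ===== VERDICT (by name: the statement is the Claim_ definition above) =====
theorem follows_spec : Claim_equal_follows := by
  intro text _
  exact follows_eq_follows_alt text
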